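-- pv_equiv track=rewrite | github.com/EdMan1022/project-euler | exercises/multiples_3_5/utils.py | sum_of_values_divisible
-- ===== SOURCE A (Python) =====
-- def divisible_by(value, divisors):
--     """
--     Raises a value error if the value isn't divisible by the divisors
--     """
--     for divisor in divisors:
--             if value % divisor == 0:
--                     return
--     raise ValueError
--
-- def sum_of_values_divisible(max, divisors):
--         """
--         Returns the sum of all values under max divisible by divisors
--
--         As long as the value is divisible by at least one divisor,
--         it is counted
--         """
--
--         divisible_sum = 0
--
--         for i in range(max):
--                 try:
--                     divisible_by(i, divisors)
--                     divisible_sum += i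
--                 except ValueError:
--                     continue
--         return divisible_sum
-- ===== SOURCE B (Python) =====
-- def sum_of_values_divisible(max, divisors):
--     """Inclusion-exclusion: signed triangular-number sums over LCMs of divisor subsets.
--     Zero divisors and divisors with no multiple below max are dropped, the rest deduped (by absolute
--     value) and divisors that are multiples of another divisor removed; any subset
--     whose LCM reaches max is pruned (all its terms are 0)."""
--     if max <= 0:
--         return 0
--
--     def gcd(a, b):
--         return a if b == 0 else gcd(b, a % b)
--
--     ds = list(dict.fromkeys(abs(d) for d in divisors if d != 0 and abs(d) < max))
--     ds = [d for d in ds if not any(e != d and d % e == 0 for e in ds)]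
--
--     def go(ds, m, sign):
--         # signed sum over all non-empty subsets drawn from ds, on top of current lcm m
--         if not ds:
--             return 0
--         d = ds[0]
--         rest = ds[1:]
--         l = m * d // gcd(m, d)
--         acc = go(rest, m, sign)
--         if l < max:
--             q = (max - 1) // l
--             acc += sign * (l * q * (q + 1) // 2) + go(rest, l, -sign)
--         return acc
--
--     return go(ds, 1, 1)
-- ===== Notes on version B (the rewrite author's own statement) =====
-- stated objective: faster
-- what changed: Replaces A's scan of every integer below max (testing each against the divisor list) by inclusion-exclusion: zero divisors and divisors with |d| >= max are dropped, the rest deduped by absolute value and cleared of multiples of another divisor, then signed closed-form triangular sums over subset LCMs are added, pruning subsets whose LCM reaches max, so the work no longer grows with max.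
-- outside the precondition, e.g. on sum_of_values_divisible(1, [2, 0]): A returns 0, B returns 0
import Mathlib
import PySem

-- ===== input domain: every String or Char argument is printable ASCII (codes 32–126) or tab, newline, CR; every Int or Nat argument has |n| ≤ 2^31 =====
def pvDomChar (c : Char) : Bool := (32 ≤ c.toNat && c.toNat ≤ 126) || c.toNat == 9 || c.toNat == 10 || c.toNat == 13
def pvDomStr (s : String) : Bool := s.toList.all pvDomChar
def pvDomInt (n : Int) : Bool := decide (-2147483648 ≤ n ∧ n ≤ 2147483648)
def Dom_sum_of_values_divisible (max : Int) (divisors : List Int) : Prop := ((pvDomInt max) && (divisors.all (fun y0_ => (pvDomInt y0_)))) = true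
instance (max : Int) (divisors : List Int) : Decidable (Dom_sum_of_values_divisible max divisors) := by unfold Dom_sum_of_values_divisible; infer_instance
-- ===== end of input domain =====

-- B replaces A's per-integer scan by inclusion-exclusion with closed-form triangular sums
-- over LCMs of divisor subsets, pruning subsets whose LCM reaches max (objective: faster).

-- ===== PORT A =====
-- divisible_by: returns normally (true) iff some divisor divides value, else raises ValueError (false)
def pyDivisibleBy (value : Int) (divisors : List Int) : Bool :=
  match divisors with
  | [] => false
  | d :: rest => if PySem.Int.mod value d = 0 then true else pyDivisibleBy value rest

def sum_of_values_divisible (max : Int) (divisors : List Int) : Int :=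
  (PySem.List.pyRange 0 max 1).foldl
    (fun divisible_sum i => if pyDivisibleBy i divisors then divisible_sum + i else divisible_sum) 0

-- ===== PORT B =====
-- Source B's gcd; its arguments are nonnegative ints, so Python's % is exactly Nat.mod here
def altGcd (a b : Nat) : Nat :=
  if h : b = 0 then a else altGcd b (a % b)
termination_by b
decreasing_by exact Nat.mod_lt _ (Nat.pos_of_ne_zero h)

-- Source B's preprocessing: keep only nonzero divisors with |d| < max, ordered dedup of absolute
-- values (dict.fromkeys), then drop every divisor that is a multiple of another one
-- ('d % e == 0' is Nat.mod: values are nonnegative)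
def altPrep (max : Int) (divisors : List Int) : List Nat :=
  let ds := PySem.List.dedup
    ((divisors.filter (fun d => d != 0 && decide ((d.natAbs : Int) < max))).map Int.natAbs)
  ds.filter (fun d => !(ds.any (fun e => e != d && d % e == 0)))

-- Source B's go: signed triangular terms for all non-empty subsets drawn from ds, on top of lcm m,
-- skipping subsets whose lcm l reaches max
def altGo (max : Int) (ds : List Nat) (m : Nat) (sign : Int) : Int :=
  match ds with
  | [] => 0
  | d :: rest =>
      let l := m * d / altGcd m d
      let acc := altGo max rest m sign
      if (l : Int) < max then
        let q := PySem.Int.floordiv (max - 1) (l : Int)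
        acc + (sign * PySem.Int.floordiv ((l : Int) * q * (q + 1)) 2 + altGo max rest l (-sign))
      else
        acc

def sum_of_values_divisible_alt (max : Int) (divisors : List Int) : Int :=
  if max ≤ 0 then 0 else altGo max (altPrep max divisors) 1 1

-- ===== PRECONDITION & SPEC =====
-- Pre_ excludes a divisor 0 when max > 0: there Python's '%' by 0 makes A raise ZeroDivisionError
-- as soon as the scan of some i reaches the 0 divisor; on the few such inputs where an earlier
-- divisor shields every i and A still returns, B returns the same value, but that corner is not claimed.
def Pre_sum_of_values_divisible (max : Int) (divisors : List Int) : Prop :=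
  (0 : Int) ∉ divisors ∨ max ≤ 0
instance (max : Int) (divisors : List Int) : Decidable (Pre_sum_of_values_divisible max divisors) := by
  unfold Pre_sum_of_values_divisible; infer_instance

def pvWitness_sum_of_values_divisible : Int × List Int := (10, [3, 5])

def Spec_sum_of_values_divisible (max : Int) (divisors : List Int) (out : Int) : Prop := out = sum_of_values_divisible_alt max divisors
instance (max : Int) (divisors : List Int) (out : Int) : Decidable (Spec_sum_of_values_divisible max divisors out) := by unfold Spec_sum_of_values_divisible; infer_instance

-- ===== CLAIM (what is proved, stated in full; the proofs are below) =====
def Claim_equal_sum_of_values_divisible : Prop := ∀ (max : Int) (divisors : List Int), Dom_sum_of_values_divisible max divisors → Pre_sum_of_values_divisible max divisors → Spec_sum_of_values_divisible max divisors (sum_of_values_divisible max divisors)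

-- ===== LEMMAS AND PROOFS =====

-- Source B's gcd is Nat.gcd
theorem altGcd_eq_gcd (a b : Nat) : altGcd a b = Nat.gcd a b := by
  induction b using Nat.strong_induction_on generalizing a with
  | _ b ih =>
    rw [altGcd]
    split_ifs with h
    · simp [h]
    · rw [ih (a % b) (Nat.mod_lt _ (Nat.pos_of_ne_zero h)), Nat.gcd_comm b (a % b),
          ← Nat.gcd_rec b a, Nat.gcd_comm b a]

theorem altLcm_eq (m dn : Nat) : m * dn / altGcd m dn = Nat.lcm m dn := by
  rw [altGcd_eq_gcd]; rfl

-- the sum A computes over [0, n), filtered to multiples of l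
def triSum (l : Nat) (n : Nat) : Int :=
  ∑ i ∈ Finset.range n, (if (l : Int) ∣ (i : Int) then (i : Int) else 0)

theorem two_mul_triSum (l : Nat) (n : Nat) (hn : 1 ≤ n) :
    2 * triSum l n = (l : Int) * ((n - 1) / l : Nat) * (((n - 1) / l : Nat) + 1) := by
  induction n with
  | zero => omega
  | succ k ih =>
    rcases Nat.lt_or_ge 0 k with h1 | h1
    · -- k ≥ 1
      have ih' := ih h1
      rw [triSum, Finset.sum_range_succ, ← triSum, Nat.add_sub_cancel]
      have hstep : k / l = (k - 1) / l + if l ∣ k then 1 else 0 := by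
        have h := @Nat.succ_div (k - 1) l
        rwa [Nat.sub_add_cancel h1] at h
      by_cases hdvd : l ∣ k
      · have hdvd' : (l : Int) ∣ (k : Int) := Int.natCast_dvd_natCast.mpr hdvd
        have hq : k / l = (k - 1) / l + 1 := by simpa [hdvd] using hstep
        have hk_eq : (k : Int) = (l : Int) * (((k - 1) / l : Nat) + 1 : Int) := by
          have h2 : l * ((k - 1) / l + 1) = k := by rw [← hq]; exact Nat.mul_div_cancel' hdvd
          exact_mod_cast h2.symm
        rw [hq]
        simp only [if_pos hdvd', Nat.cast_add, Nat.cast_one]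
        linear_combination ih' + 2 * hk_eq
      · have hdvd' : ¬ (l : Int) ∣ (k : Int) := fun h => hdvd (Int.natCast_dvd_natCast.mp h)
        have hq : k / l = (k - 1) / l := by simpa [hdvd] using hstep
        rw [hq]
        simpa [hdvd'] using ih'
    · -- k = 0 : n = 1
      have hk : k = 0 := by omega
      subst hk
      simp [triSum]

-- closed-form term of B = the filtered sum, for any modulus
theorem term_eq_triSum (max : Int) (hmax : 0 < max) (l : Nat) :
    PySem.Int.floordiv ((l : Int) * PySem.Int.floordiv (max - 1) (l : Int) *
      (PySem.Int.floordiv (max - 1) (l : Int) + 1)) 2 = triSum l max.toNat := by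
  have hn : 1 ≤ max.toNat := by omega
  have hm1 : (max - 1) = (((max.toNat - 1 : Nat)) : Int) := by omega
  have hq : PySem.Int.floordiv (max - 1) (l : Int) = (((max.toNat - 1) / l : Nat) : Int) := by
    rw [hm1]; exact_mod_cast PySem.Int.floordiv_natCast (max.toNat - 1) l
  rw [hq, ← two_mul_triSum l max.toNat hn,
      PySem.Int.floordiv_eq_ediv_of_pos (by norm_num)]
  omega

-- 'some divisor of the (Int) list divides i' / 'some element of the (Nat) list divides i'
abbrev AnyDvd (ds : List Int) (i : Int) : Prop := ∃ d ∈ ds, d ∣ i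
abbrev AnyN (ds : List Nat) (i : Int) : Prop := ∃ d ∈ ds, (d : Int) ∣ i

theorem altGo_eq (max : Int) (hmax : 0 < max) (ds : List Nat) (m : Nat) (sign : Int)
    (hm : 1 ≤ m) (hds : ∀ d ∈ ds, d ≠ 0) :
    altGo max ds m sign =
      sign * ∑ i ∈ Finset.range max.toNat,
        (if (m : Int) ∣ (i : Int) ∧ AnyN ds (i : Int) then (i : Int) else 0) := by
  induction ds generalizing m sign with
  | nil => simp [altGo, AnyN]
  | cons d rest ih =>
    have hd0 : d ≠ 0 := hds d (by simp)
    have hdn : 1 ≤ d := Nat.pos_of_ne_zero hd0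
    have hrest : ∀ d' ∈ rest, d' ≠ 0 := fun d' hd' => hds d' (List.mem_cons_of_mem _ hd')
    have hL : 1 ≤ Nat.lcm m d := Nat.lcm_pos hm hdn
    have hiff : ∀ i : Int, ((Nat.lcm m d : Nat) : Int) ∣ i ↔ ((m : Int) ∣ i ∧ (d : Int) ∣ i) := by
      intro i
      rw [Int.natCast_dvd, Nat.lcm_dvd_iff, ← Int.natCast_dvd, ← Int.natCast_dvd]
    have hcons : ∀ i : Int, AnyN (d :: rest) i ↔ ((d : Int) ∣ i ∨ AnyN rest i) := by
      intro i; simp [AnyN]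
    by_cases hlt : ((Nat.lcm m d : Nat) : Int) < max
    · simp only [altGo, altLcm_eq, if_pos hlt]
      rw [term_eq_triSum max hmax (Nat.lcm m d),
          ih (Nat.lcm m d) (-sign) hL hrest, ih m sign hm hrest]
      have key : triSum (Nat.lcm m d) max.toNat =
          (∑ i ∈ Finset.range max.toNat,
            (if (m : Int) ∣ (i : Int) ∧ AnyN (d :: rest) (i : Int) then (i : Int) else 0))
          + (∑ i ∈ Finset.range max.toNat,
            (if ((Nat.lcm m d : Nat) : Int) ∣ (i : Int) ∧ AnyN rest (i : Int) then (i : Int) else 0))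
          - (∑ i ∈ Finset.range max.toNat,
            (if (m : Int) ∣ (i : Int) ∧ AnyN rest (i : Int) then (i : Int) else 0)) := by
        rw [triSum, ← Finset.sum_add_distrib, ← Finset.sum_sub_distrib]
        refine Finset.sum_congr rfl fun i _ => ?_
        simp only [hiff, hcons]
        by_cases h1 : (m : Int) ∣ (i : Int) <;> by_cases h2 : (d : Int) ∣ (i : Int) <;>
          by_cases h3 : AnyN rest (i : Int) <;> simp [h1, h2, h3]
      rw [key]
      ring
    · simp only [altGo, altLcm_eq, if_neg hlt]
      rw [ih m sign hm hrest]
      congr 1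
      refine Finset.sum_congr rfl fun i hi => ?_
      have hi' : (i : Int) < max := by
        have := Finset.mem_range.mp hi; omega
      have hzero : (m : Int) ∣ (i : Int) → (d : Int) ∣ (i : Int) → (i : Int) = 0 := by
        intro h1 h2
        have hl : ((Nat.lcm m d : Nat) : Int) ∣ (i : Int) := (hiff (i : Int)).mpr ⟨h1, h2⟩
        have hdl : Nat.lcm m d ∣ i := Int.natCast_dvd_natCast.mp hl
        have hilt : i < Nat.lcm m d := by omega
        exact_mod_cast congrArg (Nat.cast : Nat → Int) (Nat.eq_zero_of_dvd_of_lt hdl hilt)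
      simp only [hcons]
      by_cases h1 : (m : Int) ∣ (i : Int) <;> by_cases h2 : (d : Int) ∣ (i : Int) <;>
        by_cases h3 : AnyN rest (i : Int) <;> simp [h1, h2, h3]
      exact (hzero h1 h2).symm

-- every dropped element of D is a multiple of a kept one (strong induction on the value)
theorem prep_cover (D : List Nat) (hD : ∀ x ∈ D, x ≠ 0) :
    ∀ d ∈ D, ∃ e ∈ D.filter (fun d => !(D.any (fun e => e != d && d % e == 0))), e ∣ d := by
  intro d
  induction d using Nat.strong_induction_on with
  | _ d ih =>
    intro hd
    by_cases hp : (D.any (fun e => e != d && d % e == 0)) = true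
    · obtain ⟨e, heD, he⟩ := List.any_eq_true.mp hp
      have he' : e ≠ d ∧ d % e = 0 := by simpa using he
      have he0 : e ≠ 0 := hD e heD
      have hdvd : e ∣ d := Nat.dvd_iff_mod_eq_zero.mpr he'.2
      have hlt : e < d :=
        lt_of_le_of_ne (Nat.le_of_dvd (Nat.pos_of_ne_zero (hD d hd)) hdvd) he'.1
      obtain ⟨f, hf, hfd⟩ := ih e hlt heD
      exact ⟨f, hf, hfd.trans hdvd⟩
    · refine ⟨d, ?_, dvd_refl d⟩
      rw [List.mem_filter]
      exact ⟨hd, by simp [hp]⟩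

theorem anyN_prep_iff (max : Int) (divisors : List Int) (h0 : (0 : Int) ∉ divisors)
    (i : Int) (hi0 : 0 < i) (hilt : i < max) :
    AnyN (altPrep max divisors) i ↔ AnyDvd divisors i := by
  unfold altPrep
  have hD0 : ∀ x ∈ PySem.List.dedup
      ((divisors.filter (fun d => d != 0 && decide ((d.natAbs : Int) < max))).map Int.natAbs), x ≠ 0 := by
    intro x hx
    rw [PySem.List.mem_dedup] at hx
    obtain ⟨d', hd', rfl⟩ := List.mem_map.mp hx
    exact Int.natAbs_ne_zero.mpr (fun h => h0 (h ▸ (List.mem_filter.mp hd').1))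
  have hDiff : AnyN (PySem.List.dedup
      ((divisors.filter (fun d => d != 0 && decide ((d.natAbs : Int) < max))).map Int.natAbs)) i
      ↔ AnyDvd divisors i := by
    constructor
    · rintro ⟨e, he, hdvd⟩
      rw [PySem.List.mem_dedup] at he
      obtain ⟨d', hd', rfl⟩ := List.mem_map.mp he
      exact ⟨d', (List.mem_filter.mp hd').1, Int.natAbs_dvd.mp hdvd⟩
    · rintro ⟨d', hd', hdvd⟩
      have habs : (d'.natAbs : Int) ∣ i := Int.natAbs_dvd.mpr hdvd
      have hle : (d'.natAbs : Int) ≤ i := Int.le_of_dvd hi0 habs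
      refine ⟨d'.natAbs, ?_, habs⟩
      rw [PySem.List.mem_dedup]
      have hne : d' ≠ 0 := fun h => h0 (h ▸ hd')
      exact List.mem_map.mpr ⟨d', List.mem_filter.mpr ⟨hd',
        by simp [hne]; rw [Int.abs_eq_natAbs]; exact lt_of_le_of_lt hle hilt⟩, rfl⟩
  constructor
  · rintro ⟨e, he, hdvd⟩
    exact hDiff.mp ⟨e, (List.mem_filter.mp he).1, hdvd⟩
  · intro h
    obtain ⟨e, he, hdvd⟩ := hDiff.mpr h
    obtain ⟨f, hf, hfe⟩ := prep_cover _ hD0 e he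
    exact ⟨f, hf, (Int.natCast_dvd_natCast.mpr hfe).trans hdvd⟩

theorem prep_nonzero (max : Int) (divisors : List Int) (h0 : (0 : Int) ∉ divisors) :
    ∀ d ∈ altPrep max divisors, d ≠ 0 := by
  intro d hd
  unfold altPrep at hd
  have hx := (List.mem_filter.mp hd).1
  rw [PySem.List.mem_dedup] at hx
  obtain ⟨d', hd', rfl⟩ := List.mem_map.mp hx
  exact Int.natAbs_ne_zero.mpr (fun h => h0 (h ▸ (List.mem_filter.mp hd').1))

theorem pyDivisibleBy_iff (i : Int) (ds : List Int) :
    pyDivisibleBy i ds = true ↔ AnyDvd ds i := by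
  induction ds with
  | nil => simp [pyDivisibleBy]
  | cons d rest ih =>
      simp only [pyDivisibleBy]
      split_ifs with h
      · simp only [true_iff]
        exact ⟨d, by simp, (PySem.Int.mod_eq_zero_iff_dvd i d).mp h⟩
      · have hd : ¬ d ∣ i := fun hdvd => h ((PySem.Int.mod_eq_zero_iff_dvd i d).mpr hdvd)
        rw [ih]
        simp [AnyDvd, hd]

theorem sum_map_range_eq (n : Nat) (f : Nat → Int) :
    ((List.range n).map f).sum = ∑ i ∈ Finset.range n, f i := by
  induction n with
  | zero => simp
  | succ k ih => simp [List.range_succ, Finset.sum_range_succ, ih]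

theorem a_eq_sum (max : Int) (ds : List Int) :
    sum_of_values_divisible max ds =
      ∑ i ∈ Finset.range max.toNat, (if AnyDvd ds (i : Int) then (i : Int) else 0) := by
  unfold sum_of_values_divisible
  have hfun : (fun (divisible_sum : Int) (i : Int) =>
        if pyDivisibleBy i ds then divisible_sum + i else divisible_sum)
      = (fun (divisible_sum : Int) (i : Int) =>
        divisible_sum + (if AnyDvd ds i then i else 0)) := by
    funext s i
    by_cases h : AnyDvd ds i
    · rw [if_pos ((pyDivisibleBy_iff i ds).mpr h), if_pos h]
    · rw [if_neg (fun hb => h ((pyDivisibleBy_iff i ds).mp hb)), if_neg h, add_zero]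
  rw [hfun, PySem.List.foldl_add, PySem.List.pyRange_one, List.map_map, zero_add]
  simp only [Function.comp_def, zero_add, Int.sub_zero]
  exact sum_map_range_eq max.toNat _

-- ===== VERDICT (by name: the statement is the Claim_ definition above) =====
theorem sum_of_values_divisible_spec : Claim_equal_sum_of_values_divisible := by
  intro max divisors _dom hpre
  unfold Spec_sum_of_values_divisible sum_of_values_divisible_alt
  by_cases hmax : max ≤ 0
  · rw [if_pos hmax, a_eq_sum]
    have : max.toNat = 0 := by omega
    simp [this]
  · have h0 : (0 : Int) ∉ divisors := by
      rcases hpre with h0 | h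
      · exact h0
      · omega
    rw [if_neg hmax, a_eq_sum,
        altGo_eq max (by omega) (altPrep max divisors) 1 1 le_rfl (prep_nonzero max divisors h0)]
    simp only [Nat.cast_one, one_dvd, true_and, one_mul]
    refine Finset.sum_congr rfl fun i hi => ?_
    rcases Nat.eq_zero_or_pos i with h | h
    · subst h; simp
    · have hi0 : (0 : Int) < (i : Int) := by exact_mod_cast h
      have hilt : (i : Int) < max := by
        have := Finset.mem_range.mp hi; omega
      simp only [anyN_prep_iff max divisors h0 (i : Int) hi0 hilt]
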